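-- pv_equiv track=rewrite | github.com/zgp123-wq/mindsp | mindspore_paa/utils/checkpoint.py | rename_fpn_weights
-- ===== SOURCE A (Python) =====
-- def rename_fpn_weights(layer_keys, stage_names):
--     for mapped_idx, stage_name in enumerate(stage_names, 1):
--         suffix = ""
--         if mapped_idx < 4:
--             suffix = ".lateral"
--         layer_keys = [k.replace(f"fpn.inner.layer{stage_name}.sum{suffix}", f"fpn_inner{mapped_idx}")
--                       for k in layer_keys]
--
--         layer_keys = [k.replace(f"fpn.layer{stage_name}.sum", f"fpn_layer{mapped_idx}") for k in layer_keys]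
--
--     return layer_keys
-- ===== SOURCE B (Python) =====
-- def rename_fpn_weights(layer_keys, stage_names):
--     # Memoized key-at-a-time rewrite: a dict caches the renamed form of each
--     # DISTINCT key, so the stage fold runs once per distinct key instead of
--     # rebuilding the whole list twice per stage as A does.
--     cache = {}
--     out = []
--     for k in layer_keys:
--         v = cache.get(k)
--         if v is None:
--             v = k
--             for idx, name in enumerate(stage_names, 1):
--                 suffix = ".lateral" if idx < 4 else ""
--                 v = v.replace(f"fpn.inner.layer{name}.sum{suffix}", f"fpn_inner{idx}")
--                 v = v.replace(f"fpn.layer{name}.sum", f"fpn_layer{idx}")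
--             cache[k] = v
--         out.append(v)
--     return out
-- ===== Notes on version B (the rewrite author's own statement) =====
-- stated objective: alternative
-- what changed: A rebuilds the whole key list twice per stage (stage-outer passes); B processes one key at a time and maintains a memo dict from distinct keys to their renamed form, so the stage fold is computed once per DISTINCT key and duplicates are answered by a dict lookup.
import Mathlib
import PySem

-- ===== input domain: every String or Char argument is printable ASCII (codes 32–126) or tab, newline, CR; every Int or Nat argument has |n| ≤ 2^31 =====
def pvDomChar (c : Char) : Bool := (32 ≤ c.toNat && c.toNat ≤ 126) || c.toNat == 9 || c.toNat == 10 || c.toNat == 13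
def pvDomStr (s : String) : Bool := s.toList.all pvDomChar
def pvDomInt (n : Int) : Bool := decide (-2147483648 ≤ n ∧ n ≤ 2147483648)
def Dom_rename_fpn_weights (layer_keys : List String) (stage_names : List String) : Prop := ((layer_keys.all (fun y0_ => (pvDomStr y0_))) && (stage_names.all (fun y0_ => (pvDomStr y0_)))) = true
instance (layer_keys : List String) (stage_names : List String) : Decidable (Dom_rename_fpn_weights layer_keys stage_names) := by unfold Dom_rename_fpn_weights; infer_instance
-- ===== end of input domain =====

-- B replaces A's stage-outer double list rebuild with a key-at-a-time pass that memoizes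
-- the renamed form of each distinct key in a dict (alternative structure, same results).

-- ===== PORT A =====
def rename_fpn_weights (layer_keys : List String) (stage_names : List String) : List String :=
  (PySem.List.enumerate stage_names 1).foldl
    (fun ks p =>
      let suffix : String := if p.1 < 4 then ".lateral" else ""
      let ks := ks.map (fun k =>
        PySem.Str.replace k ("fpn.inner.layer" ++ p.2 ++ ".sum" ++ suffix) ("fpn_inner" ++ PySem.Int.toStr p.1))
      ks.map (fun k =>
        PySem.Str.replace k ("fpn.layer" ++ p.2 ++ ".sum") ("fpn_layer" ++ PySem.Int.toStr p.1)))
    layer_keys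

-- ===== PORT B =====
-- Source B's inner stage fold: rename ONE key through all stages
def pvRenameKey (stages : List (Int × String)) (k : String) : String :=
  stages.foldl
    (fun v p =>
      let suffix : String := if p.1 < 4 then ".lateral" else ""
      let v := PySem.Str.replace v ("fpn.inner.layer" ++ p.2 ++ ".sum" ++ suffix) ("fpn_inner" ++ PySem.Int.toStr p.1)
      PySem.Str.replace v ("fpn.layer" ++ p.2 ++ ".sum") ("fpn_layer" ++ PySem.Int.toStr p.1))
    k

def rename_fpn_weights_alt (layer_keys : List String) (stage_names : List String) : List String :=
  (layer_keys.foldl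
    (fun (st : PySem.Dict String String × List String) k =>
      match st.1.get? k with
      | some v => (st.1, st.2 ++ [v])
      | none =>
        let v := pvRenameKey (PySem.List.enumerate stage_names 1) k
        (st.1.insert k v, st.2 ++ [v]))
    (PySem.Dict.empty, [])).2

-- ===== PRECONDITION & SPEC =====
def Spec_rename_fpn_weights (layer_keys : List String) (stage_names : List String) (out : List String) : Prop := out = rename_fpn_weights_alt layer_keys stage_names
instance (layer_keys : List String) (stage_names : List String) (out : List String) : Decidable (Spec_rename_fpn_weights layer_keys stage_names out) := by unfold Spec_rename_fpn_weights; infer_instance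

-- ===== CLAIM (what is proved, stated in full; the proofs are below) =====
def Claim_equal_rename_fpn_weights : Prop := ∀ (layer_keys : List String) (stage_names : List String), Dom_rename_fpn_weights layer_keys stage_names → Spec_rename_fpn_weights layer_keys stage_names (rename_fpn_weights layer_keys stage_names)

-- ===== LEMMAS AND PROOFS =====

-- A's stage-outer fold is the map of B's per-key stage fold
lemma pv_A_eq_map (l : List (Int × String)) :
    ∀ (ks : List String),
      l.foldl
        (fun ks p =>
          let suffix : String := if p.1 < 4 then ".lateral" else ""
          let ks := ks.map (fun k =>
            PySem.Str.replace k ("fpn.inner.layer" ++ p.2 ++ ".sum" ++ suffix) ("fpn_inner" ++ PySem.Int.toStr p.1))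
          ks.map (fun k =>
            PySem.Str.replace k ("fpn.layer" ++ p.2 ++ ".sum") ("fpn_layer" ++ PySem.Int.toStr p.1)))
        ks
      = ks.map (pvRenameKey l) := by
  induction l with
  | nil => intro ks; rw [show pvRenameKey [] = id from funext (fun k => rfl), List.map_id, List.foldl_nil]
  | cons p rest ih =>
    intro ks
    rw [List.foldl_cons, ih]
    simp only [List.map_map]
    apply List.map_congr_left
    intro k _
    simp [pvRenameKey]

-- B's memoizing fold computes the plain map, under the cache invariant
lemma pv_cache_fold (f : String → String) :
    ∀ (ks : List String) (d : PySem.Dict String String) (acc : List String),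
      (∀ k v, d.get? k = some v → v = f k) →
      (ks.foldl
        (fun (st : PySem.Dict String String × List String) k =>
          match st.1.get? k with
          | some v => (st.1, st.2 ++ [v])
          | none => (st.1.insert k (f k), st.2 ++ [f k]))
        (d, acc)).2 = acc ++ ks.map f := by
  intro ks
  induction ks with
  | nil => intro d acc _; simp
  | cons k rest ih =>
    intro d acc hinv
    rw [List.foldl_cons]
    cases hget : d.get? k with
    | some v =>
      rw [ih d (acc ++ [v]) hinv]
      simp [hinv k v hget]
    | none =>
      rw [ih (d.insert k (f k)) (acc ++ [f k])]
      · simp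
      · intro k' v' h
        rw [PySem.Dict.get?_insert] at h
        by_cases hk : k' = k
        · simp [hk] at h; simp [hk, h.symm]
        · simp [hk] at h; exact hinv k' v' h

-- ===== VERDICT (by name: the statement is the Claim_ definition above) =====
theorem rename_fpn_weights_spec : Claim_equal_rename_fpn_weights := by
  intro ks sn _
  unfold Spec_rename_fpn_weights rename_fpn_weights rename_fpn_weights_alt
  rw [pv_A_eq_map]
  rw [pv_cache_fold (pvRenameKey (PySem.List.enumerate sn 1)) ks PySem.Dict.empty []
    (by intro k v h; simp [PySem.Dict.get?_empty] at h)]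
  simp
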